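-- pv_equiv track=rewrite | github.com/OlegUkhov/O_UkhovPP2labs | Lab8PP2task3.py | is_color_pos
-- ===== SOURCE A (Python) =====
-- colorPick = {
--     'red': (255, 0, 0),
--     'green': (0, 255, 0),
--     'blue': (0, 0, 255),
--     'yellow': (255, 255, 0),
--     'purple': (128, 0, 128),
--     'orange': (255, 165, 0),
--     'cyan': (0, 255, 255),
--     'eraser': (0, 0, 0)
-- }
--
-- def is_color_pos(pos):
--     x = 10
--     y = 10
--     size = 30
--     for color_name in colorPick.keys():
--         if x <= pos[0] <= x + size and y <= pos[1] <= y + size: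
--             return True
--         x += size + 5
--     return False
-- ===== SOURCE B (Python) =====
-- def is_color_pos(pos):
--     off = pos[0] - 10
--     return bool(0 <= off <= 275 and off % 35 <= 30 and 10 <= pos[1] <= 40)
-- ===== Notes on version B (the rewrite author's own statement) =====
-- stated objective: simpler
-- what changed: Replaces the loop over the eight color buttons with a closed-form arithmetic test: offset = pos[0]-10 hits a button iff 0 <= offset <= 275 and offset % 35 <= 30 (eight 30-wide boxes every 35 px), combined with the y-range test.
import Mathlib
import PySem

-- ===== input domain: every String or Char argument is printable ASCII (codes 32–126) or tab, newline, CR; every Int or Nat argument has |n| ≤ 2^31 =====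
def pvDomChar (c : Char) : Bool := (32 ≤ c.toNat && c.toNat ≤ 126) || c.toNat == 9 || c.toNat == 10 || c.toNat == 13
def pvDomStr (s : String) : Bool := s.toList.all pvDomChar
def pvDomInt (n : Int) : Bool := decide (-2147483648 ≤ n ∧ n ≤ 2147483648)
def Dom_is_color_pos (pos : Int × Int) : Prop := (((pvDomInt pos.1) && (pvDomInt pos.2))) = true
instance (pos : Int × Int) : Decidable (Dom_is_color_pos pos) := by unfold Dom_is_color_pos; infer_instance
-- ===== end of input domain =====

-- ===== PORT A =====
-- loop over colorPick.keys() with x starting at 10 and stepping by 35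
def colorKeys : List String :=
  ["red", "green", "blue", "yellow", "purple", "orange", "cyan", "eraser"]

def isColorLoop (pos : Int × Int) (x : Int) : List String → Bool
  | [] => false
  | _ :: rest =>
    if x ≤ pos.1 ∧ pos.1 ≤ x + 30 ∧ 10 ≤ pos.2 ∧ pos.2 ≤ 10 + 30 then true
    else isColorLoop pos (x + 35) rest

def is_color_pos (pos : Int × Int) : Bool := isColorLoop pos 10 colorKeys

-- ===== PORT B =====
-- B: closed-form test, no loop (header: B replaces the 8-button loop by arithmetic; objective: simpler)
def is_color_pos_alt (pos : Int × Int) : Bool :=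
  let off := pos.1 - 10
  decide (0 ≤ off ∧ off ≤ 275 ∧ PySem.Int.mod off 35 ≤ 30 ∧ 10 ≤ pos.2 ∧ pos.2 ≤ 40)

-- ===== PRECONDITION & SPEC =====
def Spec_is_color_pos (pos : Int × Int) (out : Bool) : Prop := out = is_color_pos_alt pos
instance (pos : Int × Int) (out : Bool) : Decidable (Spec_is_color_pos pos out) := by unfold Spec_is_color_pos; infer_instance

-- ===== CLAIM (what is proved, stated in full; the proofs are below) =====
def Claim_equal_is_color_pos : Prop := ∀ (pos : Int × Int), Dom_is_color_pos pos → Spec_is_color_pos pos (is_color_pos pos)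

-- ===== LEMMAS AND PROOFS =====

-- ===== VERDICT (by name: the statement is the Claim_ definition above) =====
theorem is_color_pos_spec : Claim_equal_is_color_pos := by
  intro pos _
  obtain ⟨px, py⟩ := pos
  show is_color_pos (px, py) = is_color_pos_alt (px, py)
  simp only [is_color_pos, is_color_pos_alt, colorKeys, isColorLoop,
    PySem.Int.mod_eq_emod_of_pos (a := px - 10) (by omega : (0:Int) < 35)]
  split_ifs <;> simp_all <;> omega
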